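-- pv_equiv track=rewrite | github.com/Anas-github-acc/code | DSA/questions/interview.py | find_magnitudes
-- ===== SOURCE A (Python) =====
-- from collections import defaultdict
--
-- def find_magnitudes(unit_nodes, unit_from, unit_to, unit_weight, x):
--     # Step 1: Build adjacency list
--     graph = defaultdict(list)
--     for i in range(unit_nodes - 1):
--         graph[unit_from[i]].append((unit_to[i], unit_weight[i]))
--
--     # Step 2: Initialize result array
--     magnitudes = [0] * (unit_nodes + 1)
--     magnitudes[1] = x  # Root unit 1 has magnitude x
--
--     # Step 3: DFS to propagate magnitudes
--     def dfs(node, current_magnitude):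
--         for neighbor, weight in graph[node]:
--             magnitudes[neighbor] = (current_magnitude * weight) % (10**9 + 7)
--             dfs(neighbor, magnitudes[neighbor])
--
--     # Start DFS from unit 1
--     dfs(1, x)
--
--     # Return magnitudes for units from 1 to unit_nodes
--     return magnitudes[1:]
-- ===== SOURCE B (Python) =====
-- def find_magnitudes(unit_nodes, unit_from, unit_to, unit_weight, x):
--     # Pull-based: for each unit, walk UP its unique parent chain multiplying the
--     # edge weights, instead of pushing products down from the root by DFS.
--     MOD = 10 ** 9 + 7
--     parent = {}
--     for i in range(unit_nodes - 1):
--         parent[unit_to[i]] = (unit_from[i], unit_weight[i])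
--     result = []
--     for v in range(1, unit_nodes + 1):
--         if v == 1:
--             result.append(x)
--             continue
--         node, prod = v, 1
--         for _ in range(unit_nodes):  # a chain longer than n means a cycle
--             if node == 1 or node not in parent:
--                 break
--             p, w = parent[node]
--             prod = prod * w % MOD
--             node = p
--         result.append(prod * x % MOD if node == 1 else 0)
--     return result
-- ===== Notes on version B (the rewrite author's own statement) =====
-- stated objective: alternative
-- what changed: Replaces A's push-down recursive DFS over an adjacency list by a pull-based scheme: a child->parent map and, per unit, an iterative walk up its unique parent chain multiplying weights mod 1e9+7 (no recursion, no shared magnitudes array).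
-- outside the precondition, e.g. on find_magnitudes(2, [1], [-1], [5], 4): A returns [4, 20], B returns [4, 0]; on find_magnitudes(4, [2, 1, 1], [3, 3, 2], [3, 5, 2], 1): A returns [1, 2, 6, 0], B returns [1, 2, 5, 0]; on find_magnitudes(4, [1, 3, 4], [2, 4, 3], [2, 5, 7], 3): A returns [3, 6, 0, 0], B returns [3, 6, 0, 0]
import Mathlib
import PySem

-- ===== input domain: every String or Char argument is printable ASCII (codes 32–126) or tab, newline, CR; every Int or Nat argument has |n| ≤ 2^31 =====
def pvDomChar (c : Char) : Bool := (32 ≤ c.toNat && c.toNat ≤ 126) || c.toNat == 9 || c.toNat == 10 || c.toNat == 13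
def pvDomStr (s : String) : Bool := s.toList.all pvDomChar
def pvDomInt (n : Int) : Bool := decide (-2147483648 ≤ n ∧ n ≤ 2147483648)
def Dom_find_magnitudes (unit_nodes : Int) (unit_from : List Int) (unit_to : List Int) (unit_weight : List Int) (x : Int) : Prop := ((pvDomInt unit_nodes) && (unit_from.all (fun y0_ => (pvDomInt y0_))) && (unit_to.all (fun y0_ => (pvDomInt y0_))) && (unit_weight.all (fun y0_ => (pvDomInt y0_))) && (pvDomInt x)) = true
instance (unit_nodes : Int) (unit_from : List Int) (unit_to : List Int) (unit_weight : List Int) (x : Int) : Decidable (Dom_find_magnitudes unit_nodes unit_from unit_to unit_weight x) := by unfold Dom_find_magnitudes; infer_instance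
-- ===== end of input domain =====

-- B replaces A's push-down recursive DFS by a pull-based scheme: a child->parent map
-- and, for each unit, an iterative walk up its parent chain multiplying weights mod 1e9+7
-- (objective: alternative decomposition, no recursion and no shared result array).

-- ===== PORT A =====
-- Step 1 of A: graph = defaultdict(list); for i in range(unit_nodes-1): graph[from[i]].append((to[i], w[i]))
def pvGraphA (unit_nodes : Int) (unit_from unit_to unit_weight : List Int) :
    PySem.Dict Int (List (Int × Int)) :=
  (PySem.List.pyRange 0 (unit_nodes - 1) 1).foldl
    (fun g i => g.modify (PySem.List.pyGetD unit_from i 0) []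
      (fun l => l ++ [(PySem.List.pyGetD unit_to i 0, PySem.List.pyGetD unit_weight i 0)]))
    PySem.Dict.empty

-- Step 3 of A: the recursive dfs, fuel = recursion-depth guard only (never exhausted under Pre_)
def pvDfsA (g : PySem.Dict Int (List (Int × Int))) :
    Nat → Int → Int → List Int → List Int
  | 0, _, _, m => m
  | fuel + 1, node, cur, m =>
      (g.getD node []).foldl
        (fun m e =>
          let v := PySem.Int.mod (cur * e.2) 1000000007
          pvDfsA g fuel e.1 v (PySem.List.pySetD m e.1 v))
        m

def find_magnitudes (unit_nodes : Int) (unit_from : List Int) (unit_to : List Int) (unit_weight : List Int) (x : Int) : List Int :=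
  let g := pvGraphA unit_nodes unit_from unit_to unit_weight
  -- magnitudes = [0]*(unit_nodes+1); magnitudes[1] = x  (index 1 valid under Pre_)
  let m0 := PySem.List.pySetD (List.replicate (unit_nodes + 1).toNat (0 : Int)) 1 x
  let mf := pvDfsA g (unit_nodes + 1).toNat 1 x m0
  PySem.List.slice mf (some 1) none

-- ===== PORT B =====
-- the inner 'for _ in range(unit_nodes): if node == 1 or node not in parent: break; ...' loop
def pvWalkB (pm : PySem.Dict Int (Int × Int)) : Nat → Int → Int → Int × Int
  | 0, node, prod => (node, prod)
  | fuel + 1, node, prod =>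
      if node = 1 then (node, prod)
      else
        match pm.get? node with
        | none => (node, prod)
        | some pw => pvWalkB pm fuel pw.1 (PySem.Int.mod (prod * pw.2) 1000000007)

def find_magnitudes_alt (unit_nodes : Int) (unit_from : List Int) (unit_to : List Int) (unit_weight : List Int) (x : Int) : List Int :=
  let parent : PySem.Dict Int (Int × Int) :=
    (PySem.List.pyRange 0 (unit_nodes - 1) 1).foldl
      (fun d i => d.insert (PySem.List.pyGetD unit_to i 0)
        (PySem.List.pyGetD unit_from i 0, PySem.List.pyGetD unit_weight i 0))
      PySem.Dict.empty
  (PySem.List.pyRange 1 (unit_nodes + 1) 1).map (fun v =>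
    if v = 1 then x
    else
      let r := pvWalkB parent unit_nodes.toNat v 1
      if r.1 = 1 then PySem.Int.mod (r.2 * x) 1000000007 else 0)

-- ===== PRECONDITION & SPEC =====
-- proof/precondition-side view of the child -> (parent, weight) map both programs build
def pvBuildPM (unit_from unit_to unit_weight : List Int) (c : Nat) : PySem.Dict Int (Int × Int) :=
  (List.range c).foldl
    (fun d k => d.insert (unit_to.getD k 0) (unit_from.getD k 0, unit_weight.getD k 0))
    PySem.Dict.empty

-- the parent of v, or v itself where v has no parent (so parentless units are fixed points)
def pvParentD (pm : PySem.Dict Int (Int × Int)) (v : Int) : Int :=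
  match pm.get? v with
  | none => v
  | some pw => pw.1

-- Pre_ admits (a) well-formed tree edge lists — the natural domain: n >= 1, the three
-- lists carry the n-1 edges, targets are distinct unit labels in 1..n, and the parent
-- chains are cycle-free (stated in closed form: the (n-1)-fold parent of every child
-- unit is parentless) — and (b) any input whose first n-1 edges never leave unit 1,
-- where A's DFS stops immediately.  It excludes inputs where A raises (missing edge entries,
-- out-of-range targets reached from unit 1, cycles reachable from unit 1 =
-- RecursionError) and malformed edge lists outside the natural tree domain on which A
-- still returns: target labels outside 1..n (A then writes through Python's
-- negative-index wraparound), duplicate targets (A's value there depends on its DFS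
-- visiting order), and unreachable cycles (there A returns zeros, as does B).
def Pre_find_magnitudes (unit_nodes : Int) (unit_from : List Int) (unit_to : List Int) (unit_weight : List Int) (x : Int) : Prop :=
  1 ≤ unit_nodes ∧
  (unit_nodes - 1).toNat ≤ unit_from.length ∧
  (unit_nodes - 1).toNat ≤ unit_to.length ∧
  (unit_nodes - 1).toNat ≤ unit_weight.length ∧
  (((∀ k : Nat, k < (unit_nodes - 1).toNat →
      1 ≤ unit_to.getD k 0 ∧ unit_to.getD k 0 ≤ unit_nodes) ∧
    (∀ l : Nat, l < (unit_nodes - 1).toNat → ∀ k : Nat, k < l →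
      unit_to.getD k 0 ≠ unit_to.getD l 0) ∧
    (∀ k : Nat, k < (unit_nodes - 1).toNat →
      (pvBuildPM unit_from unit_to unit_weight (unit_nodes - 1).toNat).get?
        ((pvParentD (pvBuildPM unit_from unit_to unit_weight (unit_nodes - 1).toNat))^[unit_nodes.toNat - 1]
          (unit_to.getD k 0)) = none)) ∨
   (∀ k : Nat, k < (unit_nodes - 1).toNat → unit_from.getD k 0 ≠ 1))

instance (unit_nodes : Int) (unit_from : List Int) (unit_to : List Int) (unit_weight : List Int) (x : Int) : Decidable (Pre_find_magnitudes unit_nodes unit_from unit_to unit_weight x) := by unfold Pre_find_magnitudes; infer_instance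

def pvWitness_find_magnitudes : Int × List Int × List Int × List Int × Int :=
  (3, [1, 1], [2, 3], [5, 7], 4)

def Spec_find_magnitudes (unit_nodes : Int) (unit_from : List Int) (unit_to : List Int) (unit_weight : List Int) (x : Int) (out : List Int) : Prop := out = find_magnitudes_alt unit_nodes unit_from unit_to unit_weight x
instance (unit_nodes : Int) (unit_from : List Int) (unit_to : List Int) (unit_weight : List Int) (x : Int) (out : List Int) : Decidable (Spec_find_magnitudes unit_nodes unit_from unit_to unit_weight x out) := by unfold Spec_find_magnitudes; infer_instance

-- ===== CLAIM (what is proved, stated in full; the proofs are below) =====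
def Claim_equal_find_magnitudes : Prop := ∀ (unit_nodes : Int) (unit_from : List Int) (unit_to : List Int) (unit_weight : List Int) (x : Int), Dom_find_magnitudes unit_nodes unit_from unit_to unit_weight x → Pre_find_magnitudes unit_nodes unit_from unit_to unit_weight x → Spec_find_magnitudes unit_nodes unit_from unit_to unit_weight x (find_magnitudes unit_nodes unit_from unit_to unit_weight x)

-- ===== LEMMAS AND PROOFS =====

-- fueled views of the parent forest: root-reachability, chain length,
-- strict-ancestor test, and the magnitude of a unit
def pvReach (pm : PySem.Dict Int (Int × Int)) : Nat → Int → Bool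
  | 0, _ => false
  | fuel + 1, v =>
      match pm.get? v with
      | none => true
      | some pw => pvReach pm fuel pw.1

def pvClF (pm : PySem.Dict Int (Int × Int)) : Nat → Int → Nat
  | 0, _ => 0
  | fuel + 1, v =>
      match pm.get? v with
      | none => 0
      | some pw => pvClF pm fuel pw.1 + 1

def pvDescF (pm : PySem.Dict Int (Int × Int)) (a : Int) : Nat → Int → Bool
  | 0, _ => false
  | fuel + 1, v =>
      match pm.get? v with
      | none => false
      | some pw => (pw.1 == a) || pvDescF pm a fuel pw.1

def pvValF (pm : PySem.Dict Int (Int × Int)) (x : Int) : Nat → Int → Int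
  | 0, _ => 0
  | fuel + 1, v =>
      if v = 1 then x
      else
        match pm.get? v with
        | none => 0
        | some pw => PySem.Int.mod (pvValF pm x fuel pw.1 * pw.2) 1000000007

-- Pre_'s iterate form of acyclicity yields root-reachability
lemma pvReach_of_iterate (pm : PySem.Dict Int (Int × Int)) :
    ∀ (f : Nat) (v : Int), pm.get? ((pvParentD pm)^[f] v) = none →
      pvReach pm (f + 1) v = true := by
  intro f
  induction f with
  | zero =>
    intro v h
    simp only [Function.iterate_zero, id_eq] at h
    simp [pvReach, h]
  | succ f IH =>
    intro v h
    rw [Function.iterate_succ_apply] at h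
    cases hv : pm.get? v with
    | none =>
      simp [pvReach, hv]
    | some pw =>
      have hstep : pvParentD pm v = pw.1 := by simp [pvParentD, hv]
      rw [hstep] at h
      simp only [pvReach, hv]
      exact IH pw.1 h

-- ---- fuel stability ----

lemma pvReach_le (pm : PySem.Dict Int (Int × Int)) :
    ∀ f g v, pvReach pm f v = true → f ≤ g → pvReach pm g v = true := by
  intro f
  induction f with
  | zero => intro g v h _; simp [pvReach] at h
  | succ f IH =>
    intro g v h hle
    obtain ⟨g, rfl⟩ : ∃ g', g = g' + 1 := ⟨g - 1, by omega⟩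
    cases hv : pm.get? v with
    | none => simp [pvReach, hv]
    | some pw =>
      simp only [pvReach, hv] at h ⊢
      exact IH g pw.1 h (by omega)

lemma pvClF_stable (pm : PySem.Dict Int (Int × Int)) :
    ∀ f g v, pvReach pm f v = true → f ≤ g → pvClF pm g v = pvClF pm f v := by
  intro f
  induction f with
  | zero => intro g v h _; simp [pvReach] at h
  | succ f IH =>
    intro g v h hle
    obtain ⟨g, rfl⟩ : ∃ g', g = g' + 1 := ⟨g - 1, by omega⟩
    cases hv : pm.get? v with
    | none => simp [pvClF, hv]
    | some pw =>
      simp only [pvReach, hv] at h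
      simp only [pvClF, hv]
      rw [IH g pw.1 h (by omega)]

lemma pvDescF_stable (pm : PySem.Dict Int (Int × Int)) (a : Int) :
    ∀ f g v, pvReach pm f v = true → f ≤ g → pvDescF pm a g v = pvDescF pm a f v := by
  intro f
  induction f with
  | zero => intro g v h _; simp [pvReach] at h
  | succ f IH =>
    intro g v h hle
    obtain ⟨g, rfl⟩ : ∃ g', g = g' + 1 := ⟨g - 1, by omega⟩
    cases hv : pm.get? v with
    | none => simp [pvDescF, hv]
    | some pw =>
      simp only [pvReach, hv] at h
      simp only [pvDescF, hv]
      rw [IH g pw.1 h (by omega)]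

lemma pvValF_stable (pm : PySem.Dict Int (Int × Int)) (x : Int) :
    ∀ f g v, pvReach pm f v = true → f ≤ g → pvValF pm x g v = pvValF pm x f v := by
  intro f
  induction f with
  | zero => intro g v h _; simp [pvReach] at h
  | succ f IH =>
    intro g v h hle
    obtain ⟨g, rfl⟩ : ∃ g', g = g' + 1 := ⟨g - 1, by omega⟩
    by_cases h1 : v = 1
    · simp [pvValF, h1]
    · cases hv : pm.get? v with
      | none => simp only [pvValF, hv, if_neg h1]
      | some pw =>
        simp only [pvReach, hv] at h
        simp only [pvValF, h1, hv, if_neg h1]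
        rw [IH g pw.1 h (by omega)]

lemma pvClF_lt (pm : PySem.Dict Int (Int × Int)) :
    ∀ f v, pvReach pm f v = true → pvClF pm f v < f := by
  intro f
  induction f with
  | zero => intro v h; simp [pvReach] at h
  | succ f IH =>
    intro v h
    cases hv : pm.get? v with
    | none => simp [pvClF, hv]
    | some pw =>
      simp only [pvReach, hv] at h
      simp only [pvClF, hv]
      have := IH pw.1 h
      omega

-- ---- unfolding at a fixed sufficient fuel F (all keys good) ----

-- every node reaches a root when every key of pm does
lemma pvGood (pm : PySem.Dict Int (Int × Int)) (F : Nat) (hF : 1 ≤ F)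
    (hR : ∀ v pw, pm.get? v = some pw → pvReach pm F v = true) :
    ∀ v, pvReach pm F v = true := by
  intro v
  cases hv : pm.get? v with
  | none => exact pvReach_le pm 1 F v (by simp [pvReach, hv]) hF
  | some pw => exact hR v pw hv

lemma pvDescF_none (pm : PySem.Dict Int (Int × Int)) (a : Int) (F : Nat) (hF : 1 ≤ F)
    (v : Int) (h : pm.get? v = none) : pvDescF pm a F v = false := by
  obtain ⟨F, rfl⟩ : ∃ F', F = F' + 1 := ⟨F - 1, by omega⟩
  simp [pvDescF, h]

lemma pvDescF_some (pm : PySem.Dict Int (Int × Int)) (a : Int) (F : Nat) (hF : 1 ≤ F)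
    (hR : ∀ v pw, pm.get? v = some pw → pvReach pm F v = true)
    (v : Int) (pw : Int × Int) (h : pm.get? v = some pw) :
    pvDescF pm a F v = ((pw.1 == a) || pvDescF pm a F pw.1) := by
  obtain ⟨F, rfl⟩ : ∃ F', F = F' + 1 := ⟨F - 1, by omega⟩
  have hr : pvReach pm F pw.1 = true := by
    have := hR v pw h
    simpa only [pvReach, h] using this
  rw [show pvDescF pm a (F + 1) pw.1 = pvDescF pm a F pw.1 from
    pvDescF_stable pm a F (F + 1) pw.1 hr (by omega)]
  simp [pvDescF, h]

lemma pvClF_some (pm : PySem.Dict Int (Int × Int)) (F : Nat) (hF : 1 ≤ F)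
    (hR : ∀ v pw, pm.get? v = some pw → pvReach pm F v = true)
    (v : Int) (pw : Int × Int) (h : pm.get? v = some pw) :
    pvClF pm F v = pvClF pm F pw.1 + 1 := by
  obtain ⟨F, rfl⟩ : ∃ F', F = F' + 1 := ⟨F - 1, by omega⟩
  have hr : pvReach pm F pw.1 = true := by
    have := hR v pw h
    simpa only [pvReach, h] using this
  rw [show pvClF pm (F + 1) pw.1 = pvClF pm F pw.1 from
    pvClF_stable pm F (F + 1) pw.1 hr (by omega)]
  simp [pvClF, h]

lemma pvValF_one (pm : PySem.Dict Int (Int × Int)) (x : Int) (F : Nat) (hF : 1 ≤ F) :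
    pvValF pm x F 1 = x := by
  obtain ⟨F, rfl⟩ : ∃ F', F = F' + 1 := ⟨F - 1, by omega⟩
  simp [pvValF]

lemma pvValF_none (pm : PySem.Dict Int (Int × Int)) (x : Int) (F : Nat) (hF : 1 ≤ F)
    (v : Int) (h1 : v ≠ 1) (h : pm.get? v = none) : pvValF pm x F v = 0 := by
  obtain ⟨F, rfl⟩ : ∃ F', F = F' + 1 := ⟨F - 1, by omega⟩
  simp [pvValF, h1, h]

lemma pvValF_some (pm : PySem.Dict Int (Int × Int)) (x : Int) (F : Nat) (hF : 1 ≤ F)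
    (hR : ∀ v pw, pm.get? v = some pw → pvReach pm F v = true)
    (v : Int) (pw : Int × Int) (h1 : v ≠ 1) (h : pm.get? v = some pw) :
    pvValF pm x F v = PySem.Int.mod (pvValF pm x F pw.1 * pw.2) 1000000007 := by
  obtain ⟨F, rfl⟩ : ∃ F', F = F' + 1 := ⟨F - 1, by omega⟩
  have hr : pvReach pm F pw.1 = true := by
    have := hR v pw h
    simpa only [pvReach, h] using this
  rw [show pvValF pm x (F + 1) pw.1 = pvValF pm x F pw.1 from
    pvValF_stable pm x F (F + 1) pw.1 hr (by omega)]
  simp [pvValF, h1, h]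

-- ---- ancestors have strictly smaller chain length ----

lemma pvDescF_cl (pm : PySem.Dict Int (Int × Int)) (F : Nat) (hF : 1 ≤ F)
    (hR : ∀ v pw, pm.get? v = some pw → pvReach pm F v = true) :
    ∀ v a, pvDescF pm a F v = true → pvClF pm F a < pvClF pm F v := by
  have H : ∀ N : Nat, ∀ v, pvClF pm F v ≤ N →
      ∀ a, pvDescF pm a F v = true → pvClF pm F a < pvClF pm F v := by
    intro N
    induction N with
    | zero =>
      intro v hv a hd
      cases hg : pm.get? v with
      | none => rw [pvDescF_none pm a F hF v hg] at hd; cases hd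
      | some pw => rw [pvClF_some pm F hF hR v pw hg] at hv; omega
    | succ N IH =>
      intro v hv a hd
      cases hg : pm.get? v with
      | none => rw [pvDescF_none pm a F hF v hg] at hd; cases hd
      | some pw =>
        rw [pvDescF_some pm a F hF hR v pw hg] at hd
        rw [pvClF_some pm F hF hR v pw hg] at hv ⊢
        simp only [Bool.or_eq_true, beq_iff_eq] at hd
        rcases hd with hd | hd
        · rw [hd]; omega
        · have := IH pw.1 (by omega) a hd
          omega
  intro v a hd
  exact H (pvClF pm F v) v le_rfl a hd

lemma pvDescF_irrefl (pm : PySem.Dict Int (Int × Int)) (F : Nat) (hF : 1 ≤ F)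
    (hR : ∀ v pw, pm.get? v = some pw → pvReach pm F v = true)
    (v : Int) : pvDescF pm v F v = false := by
  by_contra h
  rw [Bool.not_eq_false] at h
  exact absurd (pvDescF_cl pm F hF hR v v h) (by omega)

lemma pvDescF_up (pm : PySem.Dict Int (Int × Int)) (F : Nat) (hF : 1 ≤ F)
    (hR : ∀ v pw, pm.get? v = some pw → pvReach pm F v = true) :
    ∀ v a pw, pm.get? a = some pw → pvDescF pm a F v = true → pvDescF pm pw.1 F v = true := by
  have H : ∀ N : Nat, ∀ v, pvClF pm F v ≤ N → ∀ a pw, pm.get? a = some pw →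
      pvDescF pm a F v = true → pvDescF pm pw.1 F v = true := by
    intro N
    induction N with
    | zero =>
      intro v hv a pw hga hd
      cases hg : pm.get? v with
      | none => rw [pvDescF_none pm a F hF v hg] at hd; cases hd
      | some qw => rw [pvClF_some pm F hF hR v qw hg] at hv; omega
    | succ N IH =>
      intro v hv a pw hga hd
      cases hg : pm.get? v with
      | none => rw [pvDescF_none pm a F hF v hg] at hd; cases hd
      | some qw =>
        rw [pvDescF_some pm a F hF hR v qw hg] at hd
        rw [pvDescF_some pm pw.1 F hF hR v qw hg]
        rw [pvClF_some pm F hF hR v qw hg] at hv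
        simp only [Bool.or_eq_true, beq_iff_eq] at hd ⊢
        rcases hd with hd | hd
        · right
          rw [hd, pvDescF_some pm pw.1 F hF hR a pw hga]
          simp
        · right; exact IH qw.1 (by omega) a pw hga hd
  intro v a pw hga hd
  exact H (pvClF pm F v) v le_rfl a pw hga hd

-- ---- the two dictionary builds, and how they relate ----

def pvBuildG (unit_from unit_to unit_weight : List Int) (c : Nat) : PySem.Dict Int (List (Int × Int)) :=
  (List.range c).foldl
    (fun g k => g.modify (unit_from.getD k 0) []
      (fun l => l ++ [(unit_to.getD k 0, unit_weight.getD k 0)]))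
    PySem.Dict.empty

lemma pvBuildPM_succ (uf ut uw : List Int) (c : Nat) :
    pvBuildPM uf ut uw (c + 1)
      = (pvBuildPM uf ut uw c).insert (ut.getD c 0) (uf.getD c 0, uw.getD c 0) := by
  simp [pvBuildPM, List.range_succ]

lemma pvBuildG_succ (uf ut uw : List Int) (c : Nat) :
    pvBuildG uf ut uw (c + 1)
      = (pvBuildG uf ut uw c).modify (uf.getD c 0) []
          (fun l => l ++ [(ut.getD c 0, uw.getD c 0)]) := by
  simp [pvBuildG, List.range_succ]

lemma pvBuildPM_eq (uf ut uw : List Int) (n : Int) :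
    (PySem.List.pyRange 0 (n - 1) 1).foldl
      (fun d i => d.insert (PySem.List.pyGetD ut i 0)
        (PySem.List.pyGetD uf i 0, PySem.List.pyGetD uw i 0))
      PySem.Dict.empty
      = pvBuildPM uf ut uw (n - 1).toNat := by
  simp [pvBuildPM, PySem.List.pyRange_one, List.foldl_map]

lemma pvBuildG_eq (uf ut uw : List Int) (n : Int) :
    pvGraphA n uf ut uw = pvBuildG uf ut uw (n - 1).toNat := by
  simp [pvGraphA, pvBuildG, PySem.List.pyRange_one, List.foldl_map]

lemma pm_get_eq (uf ut uw : List Int) (c : Nat)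
    (hnd : ∀ l : Nat, l < c → ∀ k : Nat, k < l → ut.getD k 0 ≠ ut.getD l 0) :
    ∀ k : Nat, k < c →
      (pvBuildPM uf ut uw c).get? (ut.getD k 0) = some (uf.getD k 0, uw.getD k 0) := by
  induction c with
  | zero => intro k hk; omega
  | succ c IH =>
    intro k hk
    rw [pvBuildPM_succ]
    by_cases hkc : k = c
    · subst hkc; exact PySem.Dict.get?_insert_self _ _ _
    · have hne : ut.getD k 0 ≠ ut.getD c 0 := hnd c (by omega) k (by omega)
      rw [PySem.Dict.get?_insert_of_ne _ _ hne]
      exact IH (fun l hl k' hk' => hnd l (by omega) k' hk') k (by omega)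

lemma pm_get_inv (uf ut uw : List Int) (c : Nat) :
    ∀ v pw, (pvBuildPM uf ut uw c).get? v = some pw →
      ∃ k : Nat, k < c ∧ ut.getD k 0 = v ∧ uf.getD k 0 = pw.1 ∧ uw.getD k 0 = pw.2 := by
  induction c with
  | zero => intro v pw h; simp [pvBuildPM, PySem.Dict.get?_empty] at h
  | succ c IH =>
    intro v pw h
    rw [pvBuildPM_succ, PySem.Dict.get?_insert] at h
    by_cases hv : v = ut.getD c 0
    · rw [if_pos hv] at h
      obtain rfl : (uf.getD c 0, uw.getD c 0) = pw := Option.some.inj h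
      exact ⟨c, by omega, hv.symm, rfl, rfl⟩
    · rw [if_neg hv] at h
      obtain ⟨k, hk, h1, h2, h3⟩ := IH v pw h
      exact ⟨k, by omega, h1, h2, h3⟩

lemma g_getD_inv (uf ut uw : List Int) (c : Nat) :
    ∀ a e, e ∈ (pvBuildG uf ut uw c).getD a [] →
      ∃ k : Nat, k < c ∧ uf.getD k 0 = a ∧ e = (ut.getD k 0, uw.getD k 0) := by
  induction c with
  | zero => intro a e h; simp [pvBuildG, PySem.Dict.getD_empty] at h
  | succ c IH =>
    intro a e h
    rw [pvBuildG_succ, PySem.Dict.getD_modify] at h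
    by_cases ha : a = uf.getD c 0
    · rw [if_pos ha] at h
      rcases List.mem_append.mp h with h | h
      · obtain ⟨k, hk, h1, h2⟩ := IH _ e h
        exact ⟨k, by omega, ha ▸ h1, h2⟩
      · simp only [List.mem_singleton] at h
        exact ⟨c, by omega, ha.symm, h⟩
    · rw [if_neg ha] at h
      obtain ⟨k, hk, h1, h2⟩ := IH a e h
      exact ⟨k, by omega, h1, h2⟩

lemma g_getD_mem (uf ut uw : List Int) (c : Nat) :
    ∀ k : Nat, k < c →
      (ut.getD k 0, uw.getD k 0) ∈ (pvBuildG uf ut uw c).getD (uf.getD k 0) [] := by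
  induction c with
  | zero => intro k hk; omega
  | succ c IH =>
    intro k hk
    rw [pvBuildG_succ, PySem.Dict.getD_modify]
    by_cases hkc : k = c
    · subst hkc; rw [if_pos rfl]; exact List.mem_append_right _ (by simp)
    · by_cases ha : uf.getD k 0 = uf.getD c 0
      · rw [if_pos ha]; exact List.mem_append_left _ (ha ▸ IH k (by omega))
      · rw [if_neg ha]; exact IH k (by omega)

lemma link_GP (uf ut uw : List Int) (n : Int)
    (hnd : ∀ l : Nat, l < (n - 1).toNat → ∀ k : Nat, k < l → ut.getD k 0 ≠ ut.getD l 0) :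
    ∀ a (e : Int × Int), e ∈ (pvBuildG uf ut uw (n - 1).toNat).getD a [] →
      (pvBuildPM uf ut uw (n - 1).toNat).get? e.1 = some (a, e.2) := by
  intro a e h
  obtain ⟨k, hk, h1, h2⟩ := g_getD_inv uf ut uw _ a e h
  subst h2
  rw [pm_get_eq uf ut uw _ hnd k hk, h1]

lemma link_PG (uf ut uw : List Int) (n : Int) :
    ∀ v pw, (pvBuildPM uf ut uw (n - 1).toNat).get? v = some pw →
      (v, pw.2) ∈ (pvBuildG uf ut uw (n - 1).toNat).getD pw.1 [] := by
  intro v pw h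
  obtain ⟨k, hk, h1, h2, h3⟩ := pm_get_inv uf ut uw _ v pw h
  have := g_getD_mem uf ut uw _ k hk
  rw [h1, h2, h3] at this
  exact this

-- ---- children characterisation of pvDescF (ties A's adjacency to the parent map) ----

lemma pvDescF_children (uf ut uw : List Int) (n : Int) (F : Nat) (hF : 1 ≤ F)
    (hnd : ∀ l : Nat, l < (n - 1).toNat → ∀ k : Nat, k < l → ut.getD k 0 ≠ ut.getD l 0)
    (hR : ∀ v pw, (pvBuildPM uf ut uw (n - 1).toNat).get? v = some pw →
      pvReach (pvBuildPM uf ut uw (n - 1).toNat) F v = true) :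
    ∀ (j node : Int),
      pvDescF (pvBuildPM uf ut uw (n - 1).toNat) node F j
        = ((pvBuildG uf ut uw (n - 1).toNat).getD node []).any
            (fun e => (j == e.1) || pvDescF (pvBuildPM uf ut uw (n - 1).toNat) e.1 F j) := by
  set pm := pvBuildPM uf ut uw (n - 1).toNat with hpmdef
  set g := pvBuildG uf ut uw (n - 1).toNat with hgdef
  have hGP := link_GP uf ut uw n hnd
  have hPG := link_PG uf ut uw n
  have Hfwd : ∀ N : Nat, ∀ j : Int, pvClF pm F j ≤ N → ∀ node : Int,
      pvDescF pm node F j = true →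
      ((g.getD node []).any (fun e => (j == e.1) || pvDescF pm e.1 F j)) = true := by
    intro N
    induction N with
    | zero =>
      intro j hj node hd
      cases hg : pm.get? j with
      | none => rw [pvDescF_none pm node F hF j hg] at hd; cases hd
      | some pw => rw [pvClF_some pm F hF hR j pw hg] at hj; omega
    | succ N IH =>
      intro j hj node hd
      cases hg : pm.get? j with
      | none => rw [pvDescF_none pm node F hF j hg] at hd; cases hd
      | some pw =>
        rw [pvDescF_some pm node F hF hR j pw hg] at hd
        rw [pvClF_some pm F hF hR j pw hg] at hj
        simp only [Bool.or_eq_true, beq_iff_eq] at hd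
        rcases hd with hd | hd
        · -- direct child: the edge (j, pw.2) hangs below node
          have hm := hPG j pw hg
          rw [hd] at hm
          simp only [List.any_eq_true]
          exact ⟨(j, pw.2), hm, by simp⟩
        · obtain ⟨e, he, hcond⟩ := List.any_eq_true.mp (IH pw.1 (by omega) node hd)
          simp only [Bool.or_eq_true, beq_iff_eq] at hcond
          refine List.any_eq_true.mpr ⟨e, he, ?_⟩
          simp only [Bool.or_eq_true, beq_iff_eq]
          right
          rw [pvDescF_some pm e.1 F hF hR j pw hg]
          simp only [Bool.or_eq_true, beq_iff_eq]
          tauto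
  have Hbwd : ∀ (j node : Int),
      ((g.getD node []).any (fun e => (j == e.1) || pvDescF pm e.1 F j)) = true →
      pvDescF pm node F j = true := by
    intro j node h
    obtain ⟨e, he, hcond⟩ := List.any_eq_true.mp h
    have hget := hGP node e he
    simp only [Bool.or_eq_true, beq_iff_eq] at hcond
    rcases hcond with hcond | hcond
    · rw [hcond, pvDescF_some pm node F hF hR e.1 (node, e.2) hget]
      simp
    · exact pvDescF_up pm F hF hR j e.1 (node, e.2) hget hcond
  intro j node
  by_cases hd : pvDescF pm node F j = true
  · rw [hd, Hfwd (pvClF pm F j) j le_rfl node hd]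
  · have h2 : ((g.getD node []).any fun e => (j == e.1) || pvDescF pm e.1 F j) = false := by
      by_contra hc
      exact hd (Hbwd j node (by revert hc; cases ((g.getD node []).any fun e => (j == e.1) || pvDescF pm e.1 F j) <;> simp))
    rw [Bool.not_eq_true] at hd
    rw [hd, h2]

-- ---- the DFS of A, characterised ----

lemma pvDfsA_length (g : PySem.Dict Int (List (Int × Int))) :
    ∀ (fuel : Nat) (node cur : Int) (m : List Int),
      (pvDfsA g fuel node cur m).length = m.length := by
  intro fuel
  induction fuel with
  | zero => intro node cur m; rfl
  | succ f IH =>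
    intro node cur m
    show ((g.getD node []).foldl _ m).length = m.length
    generalize (g.getD node []) = L
    induction L generalizing m with
    | nil => rfl
    | cons e t IHt =>
      simp only [List.foldl_cons]
      rw [IHt, IH, PySem.List.length_pySetD]

lemma pvDfsA_getD (n : Int) (hn : 1 ≤ n)
    (pm : PySem.Dict Int (Int × Int)) (g : PySem.Dict Int (List (Int × Int)))
    (hR : ∀ v pw, pm.get? v = some pw → pvReach pm n.toNat v = true)
    (hB : ∀ v pw, pm.get? v = some pw → 1 ≤ v ∧ v ≤ n)
    (hGP : ∀ a (e : Int × Int), e ∈ g.getD a [] → pm.get? e.1 = some (a, e.2))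
    (hch : ∀ (j node : Int),
      pvDescF pm node n.toNat j
        = (g.getD node []).any (fun e => (j == e.1) || pvDescF pm e.1 n.toNat j))
    (x : Int) :
    ∀ (fuel : Nat) (node cur : Int) (m : List Int),
      n.toNat + 1 ≤ pvClF pm n.toNat node + fuel →
      (node = 1 ∨ pvDescF pm 1 n.toNat node = true) →
      cur = pvValF pm x n.toNat node → m.length = (n + 1).toNat →
      ∀ j : Nat, (pvDfsA g fuel node cur m).getD j 0 =
        if pvDescF pm node n.toNat (j : Int) then pvValF pm x n.toNat (j : Int) else m.getD j 0 := by
  have hF : 1 ≤ n.toNat := by omega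
  intro fuel
  induction fuel with
  | zero =>
    intro node cur m hfuel hdesc hcur hlen j
    exfalso
    have := pvClF_lt pm n.toNat node (pvGood pm n.toNat hF hR node)
    omega
  | succ fuel IH =>
    intro node cur m hfuel hdesc hcur hlen j
    -- node 1 is never a child of a node at or below unit 1
    have hnochild1 : ∀ w : Int × Int, pm.get? 1 = some (node, w.2) → False := by
      intro w hg1
      have hd11 : pvDescF pm 1 n.toNat 1 = true := by
        rw [pvDescF_some pm 1 n.toNat hF hR 1 (node, w.2) hg1]
        simp only [Bool.or_eq_true, beq_iff_eq]
        rcases hdesc with h | h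
        · left; exact h
        · right; exact h
      rw [pvDescF_irrefl pm n.toNat hF hR 1] at hd11
      cases hd11
    have Hfold : ∀ (L : List (Int × Int)) (m' : List Int),
        (∀ e ∈ L, pm.get? e.1 = some (node, e.2)) → m'.length = (n + 1).toNat →
        ∀ j : Nat,
          (L.foldl (fun m e =>
              pvDfsA g fuel e.1 (PySem.Int.mod (cur * e.2) 1000000007)
                (PySem.List.pySetD m e.1 (PySem.Int.mod (cur * e.2) 1000000007))) m').getD j 0
            = if (L.any fun e => ((j : Int) == e.1) || pvDescF pm e.1 n.toNat (j : Int))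
                then pvValF pm x n.toNat (j : Int) else m'.getD j 0 := by
      intro L
      induction L with
      | nil => intro m' _ _ j; simp
      | cons e t IHt =>
        intro m' hmem hlen' j
        have he := hmem e (by simp)
        have hb := hB e.1 (node, e.2) he
        have he1 : e.1 ≠ 1 := by
          intro hx
          exact hnochild1 e (hx ▸ he)
        have hvv : PySem.Int.mod (cur * e.2) 1000000007 = pvValF pm x n.toNat e.1 := by
          rw [pvValF_some pm x n.toNat hF hR e.1 (node, e.2) he1 he, hcur]
        have hcl : pvClF pm n.toNat e.1 = pvClF pm n.toNat node + 1 :=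
          pvClF_some pm n.toNat hF hR e.1 (node, e.2) he
        have hde : pvDescF pm 1 n.toNat e.1 = true := by
          rw [pvDescF_some pm 1 n.toNat hF hR e.1 (node, e.2) he]
          simp only [Bool.or_eq_true, beq_iff_eq]
          rcases hdesc with h | h
          · left; exact h
          · right; exact h
        simp only [List.foldl_cons]
        rw [IHt _ (fun e' he' => hmem e' (List.mem_cons_of_mem _ he'))
          (by rw [pvDfsA_length, PySem.List.length_pySetD]; exact hlen') j]
        rw [IH e.1 (PySem.Int.mod (cur * e.2) 1000000007)
          (PySem.List.pySetD m' e.1 (PySem.Int.mod (cur * e.2) 1000000007))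
          (by omega) (Or.inr hde) hvv (by rw [PySem.List.length_pySetD]; exact hlen') j]
        have hset : (PySem.List.pySetD m' e.1 (PySem.Int.mod (cur * e.2) 1000000007)).getD j 0
            = if (j : Int) = e.1 then pvValF pm x n.toNat e.1 else m'.getD j 0 := by
          rw [PySem.List.pySetD_of_nonneg m' _ (by omega), ← hvv]
          rw [List.getD_eq_getElem?_getD, List.getElem?_set]
          by_cases hj : (j : Int) = e.1
          · have hj' : e.1.toNat = j := by omega
            have hlt : e.1.toNat < m'.length := by rw [hlen']; omega
            rw [if_pos hj, if_pos hj', if_pos hlt]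
            simp
          · have hj' : ¬ e.1.toNat = j := by omega
            rw [if_neg hj, if_neg hj', ← List.getD_eq_getElem?_getD]
        rw [hset]
        by_cases hA : (t.any fun e => ((j : Int) == e.1) || pvDescF pm e.1 n.toNat (j : Int)) = true
        · rw [if_pos hA, if_pos (by simp only [List.any_cons, Bool.or_eq_true]; right; exact hA)]
        · rw [if_neg hA]
          by_cases hBc : pvDescF pm e.1 n.toNat (j : Int) = true
          · rw [if_pos hBc, if_pos (by simp only [List.any_cons, Bool.or_eq_true]; left; simp [hBc])]
          · rw [if_neg hBc]
            by_cases hC : (j : Int) = e.1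
            · rw [if_pos hC, if_pos (by simp only [List.any_cons, Bool.or_eq_true]; left; simp [hC]), hC]
            · rw [if_neg hC, if_neg (by
                simp only [List.any_cons, Bool.or_eq_true, beq_iff_eq]
                rintro (⟨h | h⟩ | h)
                · exact hC h
                · exact hBc h
                · exact hA h)]
    show ((g.getD node []).foldl _ m).getD j 0 = _
    rw [Hfold (g.getD node []) m (fun e he => hGP node e he) hlen j, ← hch (j : Int) node]

-- ---- B's walk, characterised ----

lemma pvWalkB_at_one (pm : PySem.Dict Int (Int × Int)) :
    ∀ (g : Nat) (p : Int), pvWalkB pm g 1 p = (1, p) := by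
  intro g p
  cases g with
  | zero => rfl
  | succ g => simp [pvWalkB]

-- modular-arithmetic helpers
lemma pvMod_eq (a : Int) : PySem.Int.mod a 1000000007 = a % 1000000007 := by
  rw [PySem.Int.mod_eq_emod_of_pos (by norm_num : (0:Int) < 1000000007)]

lemma pvEmodMulLeft (a c M : Int) : (a % M * c) % M = (a * c) % M := by
  conv_rhs => rw [Int.mul_emod]
  rw [Int.mul_emod, Int.emod_emod_of_dvd _ dvd_rfl]

lemma pvEmodMulRight (a b M : Int) : (a * (b % M)) % M = (a * b) % M := by
  conv_rhs => rw [Int.mul_emod]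
  rw [Int.mul_emod, Int.emod_emod_of_dvd _ dvd_rfl]

lemma pvValF_emod (pm : PySem.Dict Int (Int × Int)) (x : Int) (F : Nat) (hF : 1 ≤ F)
    (hR : ∀ v pw, pm.get? v = some pw → pvReach pm F v = true)
    (v : Int) (h1 : v ≠ 1) :
    (pvValF pm x F v) % 1000000007 = pvValF pm x F v := by
  cases hg : pm.get? v with
  | none =>
    rw [pvValF_none pm x F hF v h1 hg]
    rfl
  | some pw =>
    rw [pvValF_some pm x F hF hR v pw h1 hg, pvMod_eq,
      Int.emod_emod_of_dvd _ dvd_rfl]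

lemma pvWalkB_char (pm : PySem.Dict Int (Int × Int)) (x : Int) (F : Nat) (hF : 1 ≤ F)
    (hR : ∀ v pw, pm.get? v = some pw → pvReach pm F v = true) :
    ∀ (f g : Nat) (v prod : Int), pvReach pm f v = true → f ≤ g + 1 → v ≠ 1 →
      (pvDescF pm 1 F v = true →
        (pvWalkB pm g v prod).1 = 1 ∧
        ((pvWalkB pm g v prod).2 * x) % 1000000007
          = (prod * pvValF pm x F v) % 1000000007) ∧
      (pvDescF pm 1 F v = false → (pvWalkB pm g v prod).1 ≠ 1) := by
  intro f
  induction f with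
  | zero => intro g v prod h _ _; simp [pvReach] at h
  | succ f IH =>
    intro g v prod h hle h1
    cases hv : pm.get? v with
    | none =>
      have hwalk : pvWalkB pm g v prod = (v, prod) := by
        cases g with
        | zero => rfl
        | succ g => simp [pvWalkB, h1, hv]
      constructor
      · intro hd
        rw [pvDescF_none pm 1 F hF v hv] at hd
        cases hd
      · intro _
        rw [hwalk]
        exact h1
    | some pw =>
      simp only [pvReach, hv] at h
      have hf1 : 1 ≤ f := by
        cases f with
        | zero => simp [pvReach] at h
        | succ f => omega
      obtain ⟨g, rfl⟩ : ∃ g', g = g' + 1 := ⟨g - 1, by omega⟩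
      have hwalk : pvWalkB pm (g + 1) v prod
          = pvWalkB pm g pw.1 (PySem.Int.mod (prod * pw.2) 1000000007) := by
        simp [pvWalkB, h1, hv]
      have hdv : pvDescF pm 1 F v = ((pw.1 == 1) || pvDescF pm 1 F pw.1) :=
        pvDescF_some pm 1 F hF hR v pw hv
      have hvalv : pvValF pm x F v = PySem.Int.mod (pvValF pm x F pw.1 * pw.2) 1000000007 :=
        pvValF_some pm x F hF hR v pw h1 hv
      by_cases hc : pw.1 = 1
      · -- the chain hits unit 1 right now
        have hres : pvWalkB pm (g + 1) v prod = (1, PySem.Int.mod (prod * pw.2) 1000000007) := by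
          rw [hwalk, hc, pvWalkB_at_one]
        constructor
        · intro _
          refine ⟨by rw [hres], ?_⟩
          rw [hres, hvalv, hc, pvValF_one pm x F hF, pvMod_eq, pvMod_eq]
          rw [pvEmodMulLeft, pvEmodMulRight]
          ring_nf
        · intro hd
          rw [hdv, hc] at hd
          simp at hd
      · -- keep climbing
        have hIH := IH g pw.1 (PySem.Int.mod (prod * pw.2) 1000000007) h (by omega) hc
        have hdv' : pvDescF pm 1 F v = pvDescF pm 1 F pw.1 := by
          rw [hdv]
          simp [hc]
        constructor
        · intro hd
          rw [hdv'] at hd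
          obtain ⟨hr1, hr2⟩ := hIH.1 hd
          refine ⟨by rw [hwalk]; exact hr1, ?_⟩
          rw [hwalk, hr2, hvalv, pvMod_eq, pvMod_eq]
          rw [pvEmodMulLeft, pvEmodMulRight]
          ring_nf
        · intro hd
          rw [hdv'] at hd
          rw [hwalk]
          exact hIH.2 hd

-- ---- the initial magnitudes array of A ----

def pvInit (n x : Int) : List Int :=
  PySem.List.pySetD (List.replicate (n + 1).toNat (0 : Int)) 1 x

lemma pvInit_length (n x : Int) : (pvInit n x).length = (n + 1).toNat := by
  rw [pvInit, PySem.List.length_pySetD, List.length_replicate]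

lemma pvInit_getD (n x : Int) (hn : 1 ≤ n) :
    ∀ j : Nat, (pvInit n x).getD j 0 = if j = 1 then x else 0 := by
  intro j
  rw [pvInit, PySem.List.pySetD_of_nonneg _ _ (by omega)]
  rw [List.getD_eq_getElem?_getD, List.getElem?_set]
  have h1 : (1 : Int).toNat = 1 := rfl
  rw [h1]
  by_cases hj : j = 1
  · rw [if_pos hj.symm, if_pos (by rw [List.length_replicate]; omega), if_pos hj]
    rfl
  · rw [if_neg (fun h => hj h.symm), if_neg hj, List.getElem?_replicate]
    split <;> rfl

-- ---- the two ports, characterised (tree-shaped case) ----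

lemma a_char (n : Int) (uf ut uw : List Int) (x : Int) (hn : 1 ≤ n)
    (hb : ∀ k : Nat, k < (n - 1).toNat → 1 ≤ ut.getD k 0 ∧ ut.getD k 0 ≤ n)
    (hnd : ∀ l : Nat, l < (n - 1).toNat → ∀ k : Nat, k < l → ut.getD k 0 ≠ ut.getD l 0)
    (hR : ∀ v pw, (pvBuildPM uf ut uw (n - 1).toNat).get? v = some pw →
      pvReach (pvBuildPM uf ut uw (n - 1).toNat) n.toNat v = true) :
    find_magnitudes n uf ut uw x
      = (List.range n.toNat).map (fun (k : Nat) =>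
          if pvDescF (pvBuildPM uf ut uw (n - 1).toNat) 1 n.toNat ((k : Int) + 1)
          then pvValF (pvBuildPM uf ut uw (n - 1).toNat) x n.toNat ((k : Int) + 1)
          else if k = 0 then x else 0) := by
  have hF : 1 ≤ n.toNat := by omega
  have hBk : ∀ v pw, (pvBuildPM uf ut uw (n - 1).toNat).get? v = some pw → 1 ≤ v ∧ v ≤ n := by
    intro v pw h
    obtain ⟨k, hk, h1, _, _⟩ := pm_get_inv uf ut uw _ v pw h
    have := hb k hk
    omega
  have hch := pvDescF_children uf ut uw n n.toNat hF hnd hR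
  have hGP := link_GP uf ut uw n hnd
  show PySem.List.slice
      (pvDfsA (pvGraphA n uf ut uw) (n + 1).toNat 1 x (pvInit n x)) (some 1) none = _
  rw [pvBuildG_eq]
  have hmain := pvDfsA_getD n hn (pvBuildPM uf ut uw (n - 1).toNat)
    (pvBuildG uf ut uw (n - 1).toNat) hR hBk hGP hch x (n + 1).toNat 1 x (pvInit n x)
    (by omega) (Or.inl rfl) (pvValF_one _ x n.toNat hF).symm (pvInit_length n x)
  have hlenf : (pvDfsA (pvBuildG uf ut uw (n - 1).toNat) (n + 1).toNat 1 x (pvInit n x)).length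
      = (n + 1).toNat := by rw [pvDfsA_length, pvInit_length]
  rw [PySem.List.slice_from_one]
  apply List.ext_getElem
  · rw [List.length_tail, hlenf, List.length_map, List.length_range]; omega
  · intro k h1 h2
    rw [List.getElem_tail, List.getElem_map, List.getElem_range]
    have hk : k < n.toNat := by rw [List.length_map, List.length_range] at h2; exact h2
    have hlt2 : k + 1 < (pvDfsA (pvBuildG uf ut uw (n - 1).toNat) (n + 1).toNat 1 x
        (pvInit n x)).length := by rw [hlenf]; omega
    rw [← List.getD_eq_getElem _ 0 hlt2, hmain (k + 1), pvInit_getD n x hn (k + 1)]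
    have hc : ((k + 1 : Nat) : Int) = (k : Int) + 1 := by push_cast; ring
    rw [hc]
    by_cases hd : pvDescF (pvBuildPM uf ut uw (n - 1).toNat) 1 n.toNat ((k : Int) + 1) = true
    · rw [if_pos hd, if_pos hd]
    · rw [if_neg hd, if_neg hd]
      by_cases hk0 : k = 0
      · rw [if_pos (by omega), if_pos hk0]
      · rw [if_neg (by omega), if_neg hk0]

lemma b_char (n : Int) (uf ut uw : List Int) (x : Int) (hn : 1 ≤ n)
    (hR : ∀ v pw, (pvBuildPM uf ut uw (n - 1).toNat).get? v = some pw →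
      pvReach (pvBuildPM uf ut uw (n - 1).toNat) n.toNat v = true) :
    find_magnitudes_alt n uf ut uw x
      = (List.range n.toNat).map (fun (k : Nat) =>
          if k = 0 then x
          else if pvDescF (pvBuildPM uf ut uw (n - 1).toNat) 1 n.toNat ((k : Int) + 1)
          then pvValF (pvBuildPM uf ut uw (n - 1).toNat) x n.toNat ((k : Int) + 1)
          else 0) := by
  have hF : 1 ≤ n.toNat := by omega
  set pm := pvBuildPM uf ut uw (n - 1).toNat with hpmdef
  show (PySem.List.pyRange 1 (n + 1) 1).map _ = _
  rw [pvBuildPM_eq uf ut uw n, ← hpmdef]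
  rw [PySem.List.pyRange_one 1 (n + 1), List.map_map]
  have hlen : (n + 1 - 1).toNat = n.toNat := by omega
  rw [hlen]
  apply List.map_congr_left
  intro k hk
  rw [List.mem_range] at hk
  simp only [Function.comp_apply]
  by_cases hk0 : k = 0
  · subst hk0
    rw [if_pos (by norm_num), if_pos rfl]
  · have hv1 : (1 : Int) + (k : Int) ≠ 1 := by omega
    rw [if_neg hv1, if_neg hk0]
    have hgood : pvReach pm n.toNat (1 + (k : Int)) = true := pvGood pm n.toNat hF hR _
    have hW := pvWalkB_char pm x n.toNat hF hR n.toNat n.toNat (1 + (k : Int)) 1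
      hgood (by omega) hv1
    have hcast : (1 : Int) + (k : Int) = (k : Int) + 1 := by ring
    by_cases hd : pvDescF pm 1 n.toNat (1 + (k : Int)) = true
    · obtain ⟨hr1, hr2⟩ := hW.1 hd
      rw [if_pos hr1]
      rw [hcast] at hd
      rw [if_pos hd]
      rw [pvMod_eq]
      rw [hr2, one_mul, ← hcast]
      rw [← hcast] at *
      exact pvValF_emod pm x n.toNat hF hR (1 + (k : Int)) hv1
    · have hr1 := hW.2 (by simpa using hd)
      rw [if_neg hr1]
      rw [hcast] at hd
      rw [if_neg hd]

-- ---- the no-edges-out-of-unit-1 case ----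

lemma pvWalkB_ne_one (pm : PySem.Dict Int (Int × Int))
    (h0 : ∀ v pw, pm.get? v = some pw → pw.1 ≠ 1) :
    ∀ (g : Nat) (v prod : Int), v ≠ 1 → (pvWalkB pm g v prod).1 ≠ 1 := by
  intro g
  induction g with
  | zero => intro v prod hv; exact hv
  | succ g IH =>
    intro v prod hv
    cases hg : pm.get? v with
    | none => simp [pvWalkB, hv, hg]
    | some pw =>
      simp only [pvWalkB, if_neg hv, hg]
      exact IH pw.1 _ (h0 v pw hg)

lemma noroot_eq (n : Int) (uf ut uw : List Int) (x : Int) (hn : 1 ≤ n)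
    (h0 : ∀ k : Nat, k < (n - 1).toNat → uf.getD k 0 ≠ 1) :
    find_magnitudes n uf ut uw x = find_magnitudes_alt n uf ut uw x := by
  -- A's side: node 1 has no outgoing edge, so the DFS returns the initial array
  have hg1 : (pvBuildG uf ut uw (n - 1).toNat).getD 1 [] = [] := by
    rw [List.eq_nil_iff_forall_not_mem]
    intro e he
    obtain ⟨k, hk, h1, _⟩ := g_getD_inv uf ut uw _ 1 e he
    exact h0 k hk h1
  have hA : find_magnitudes n uf ut uw x = (pvInit n x).tail := by
    show PySem.List.slice
        (pvDfsA (pvGraphA n uf ut uw) (n + 1).toNat 1 x (pvInit n x)) (some 1) none = _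
    rw [pvBuildG_eq]
    have hdfs : pvDfsA (pvBuildG uf ut uw (n - 1).toNat) (n + 1).toNat 1 x (pvInit n x)
        = pvInit n x := by
      cases hf : (n + 1).toNat with
      | zero => rfl
      | succ f =>
        show ((pvBuildG uf ut uw (n - 1).toNat).getD 1 []).foldl _ (pvInit n x) = _
        rw [hg1, List.foldl_nil]
    rw [hdfs, PySem.List.slice_from_one]
  -- B's side: no parent is unit 1, so no walk ever stops at unit 1
  have hpm0 : ∀ v pw, (pvBuildPM uf ut uw (n - 1).toNat).get? v = some pw → pw.1 ≠ 1 := by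
    intro v pw h
    obtain ⟨k, hk, _, h2, _⟩ := pm_get_inv uf ut uw _ v pw h
    rw [← h2]
    exact h0 k hk
  rw [hA]
  show _ = (PySem.List.pyRange 1 (n + 1) 1).map _
  rw [pvBuildPM_eq uf ut uw n]
  apply List.ext_getElem
  · rw [List.length_tail, pvInit_length, List.length_map, PySem.List.length_pyRange_one]
    omega
  · intro k h1 h2
    rw [List.getElem_tail, List.getElem_map, PySem.List.getElem_pyRange_one]
    have hkn : k < (n + 1).toNat - 1 := by
      rw [List.length_tail, pvInit_length] at h1; exact h1
    have hlt : k + 1 < (pvInit n x).length := by rw [pvInit_length]; omega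
    rw [← List.getD_eq_getElem _ 0 hlt, pvInit_getD n x hn (k + 1)]
    by_cases hk0 : k = 0
    · subst hk0
      rw [if_pos rfl, if_pos (by norm_num)]
    · rw [if_neg (by omega), if_neg (by omega : ¬ (1 : Int) + (k : Int) = 1)]
      have := pvWalkB_ne_one (pvBuildPM uf ut uw (n - 1).toNat) hpm0 n.toNat
        (1 + (k : Int)) 1 (by omega)
      rw [if_neg this]

-- ===== VERDICT =====
theorem find_magnitudes_spec : Claim_equal_find_magnitudes := by
  intro n uf ut uw x _ pre
  unfold Spec_find_magnitudes
  obtain ⟨hn, hlf, hlt, hlw, hdisj⟩ := pre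
  rcases hdisj with ⟨hb, hnd, hreach⟩ | h0
  · have hR : ∀ v pw, (pvBuildPM uf ut uw (n - 1).toNat).get? v = some pw →
        pvReach (pvBuildPM uf ut uw (n - 1).toNat) n.toNat v = true := by
      intro v pw h
      obtain ⟨k, hk, h1, _, _⟩ := pm_get_inv uf ut uw _ v pw h
      rw [← h1]
      have := pvReach_of_iterate (pvBuildPM uf ut uw (n - 1).toNat) (n.toNat - 1)
        (ut.getD k 0) (hreach k hk)
      rwa [show n.toNat - 1 + 1 = n.toNat by omega] at this
    have hF : 1 ≤ n.toNat := by omega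
    rw [a_char n uf ut uw x hn hb hnd hR, b_char n uf ut uw x hn hR]
    apply List.map_congr_left
    intro k hk
    rw [List.mem_range] at hk
    by_cases hk0 : k = 0
    · subst hk0
      rw [show (((0 : Nat) : Int) + 1) = (1 : Int) by norm_num]
      rw [pvDescF_irrefl (pvBuildPM uf ut uw (n - 1).toNat) n.toNat hF hR 1]
      simp
    · by_cases hd : pvDescF (pvBuildPM uf ut uw (n - 1).toNat) 1 n.toNat ((k : Int) + 1) = true
      · rw [if_pos hd, if_neg hk0, if_pos hd]
      · rw [if_neg hd, if_neg hk0, if_neg hk0, if_neg hd]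
  · exact noroot_eq n uf ut uw x hn h0
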